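-- pv_equiv track=rewrite | github.com/Salinporn/KMITL | Algorithm-Design-and-Analysis/practice/inequality.py | solving_inequality
-- ===== SOURCE A (Python) =====
-- def solving_inequality(y_val):
--     left = 0
--     right = 100000000000000000
--     result = 0
--     while left <= right:
--         mid = (right + left) // 2
--         equation = (mid * mid) + mid
--         if equation == y_val:
--             return mid
--         elif equation < y_val:
--             result = mid
--             left = mid + 1
--         else:
--             right = mid - 1
--     return result
-- ===== SOURCE B (Python) =====
-- def _isqrt(n):
--     # Newton's method for the integer square root (n >= 0)
--     if n <= 1:
--         return n
--     guess = 1 << ((n.bit_length() - 1) // 2 + 1)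
--     while True:
--         nxt = (guess + n // guess) // 2
--         if nxt < guess:
--             guess = nxt
--         else:
--             return guess
--
--
-- def solving_inequality(y_val):
--     # largest m >= 0 with m*m + m <= y_val, via the closed form m = (isqrt(1+4y)-1)//2
--     if y_val < 0:
--         return 0
--     return (_isqrt(1 + 4 * y_val) - 1) // 2
-- ===== Notes on version B (the rewrite author's own statement) =====
-- stated objective: alternative
-- what changed: Replaced the binary search over a fixed huge range by a closed-form computation of the answer from a hand-written Newton-iteration integer square root, with negative inputs returning zero immediately.
import Mathlib
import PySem

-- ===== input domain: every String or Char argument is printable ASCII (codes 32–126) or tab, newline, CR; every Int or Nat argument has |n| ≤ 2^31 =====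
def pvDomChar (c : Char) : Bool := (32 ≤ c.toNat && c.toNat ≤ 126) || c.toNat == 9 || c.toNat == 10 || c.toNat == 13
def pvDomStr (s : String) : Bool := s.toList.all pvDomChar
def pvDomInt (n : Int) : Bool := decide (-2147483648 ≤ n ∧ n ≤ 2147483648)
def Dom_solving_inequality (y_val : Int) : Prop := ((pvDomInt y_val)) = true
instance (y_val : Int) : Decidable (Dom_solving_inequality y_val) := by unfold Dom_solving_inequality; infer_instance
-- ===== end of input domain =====

-- B replaces A's binary search over a fixed huge range by a closed form computed from a
-- hand-written Newton-iteration integer square root (objective: alternative algorithm).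

-- ===== PORT A =====
-- Python's locals 'mid = (right + left) // 2' and 'equation = (mid * mid) + mid'
def siMid (left right : Int) : Int := PySem.Int.floordiv (right + left) 2
def siEqn (mid : Int) : Int := mid * mid + mid

-- the while loop of A over the state (left, right, result); the Nat fuel only makes the
-- recursion structural: the caller passes fuel > right - left + 1, which the loop never exhausts
def siLoopA : Nat → Int → Int → Int → Int → Int
  | 0, _, _, _, result => result
  | fuel + 1, y_val, left, right, result =>
    if left ≤ right then
      if siEqn (siMid left right) = y_val then siMid left right
      else if siEqn (siMid left right) < y_val then
        siLoopA fuel y_val (siMid left right + 1) right (siMid left right)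
      else
        siLoopA fuel y_val left (siMid left right - 1) result
    else result

def solving_inequality (y_val : Int) : Int :=
  siLoopA 100000000000000002 y_val 0 100000000000000000 0

-- ===== PORT B =====
-- Python's local 'nxt = (guess + n // guess) // 2'
def siNext (n guess : Int) : Int :=
  PySem.Int.floordiv (guess + PySem.Int.floordiv n guess) 2

-- the 'while True' loop of _isqrt; fuel > guess makes it structural (each pass lowers guess)
def siIter : Nat → Int → Int → Int
  | 0, _, guess => guess
  | fuel + 1, n, guess =>
      if siNext n guess < guess then siIter fuel n (siNext n guess) else guess

-- _isqrt; Python's (n.bit_length() - 1) // 2 + 1 is Nat arithmetic here: bit_length ≥ 2 on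
-- every n ≥ 2 reaching this branch, so Nat subtraction and division agree with Python's
def siIsqrt (n : Int) : Int :=
  if n ≤ 1 then n
  else
    siIter (((1 : Int) <<< ((PySem.Int.bitLength n - 1) / 2 + 1)).toNat + 1) n
      ((1 : Int) <<< ((PySem.Int.bitLength n - 1) / 2 + 1))

def solving_inequality_alt (y_val : Int) : Int :=
  if y_val < 0 then 0
  else PySem.Int.floordiv (siIsqrt (1 + 4 * y_val) - 1) 2

-- ===== PRECONDITION & SPEC =====
def Spec_solving_inequality (y_val : Int) (out : Int) : Prop := out = solving_inequality_alt y_val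
instance (y_val : Int) (out : Int) : Decidable (Spec_solving_inequality y_val out) := by unfold Spec_solving_inequality; infer_instance

-- ===== CLAIM (what is proved, stated in full; the proofs are below) =====
def Claim_equal_solving_inequality : Prop := ∀ (y_val : Int), Dom_solving_inequality y_val → Spec_solving_inequality y_val (solving_inequality y_val)

-- ===== LEMMAS AND PROOFS =====

-- the characterisation both programs satisfy on 0 ≤ y: r is the largest m with m*m+m ≤ y
def GoodSI (y r : Int) : Prop := 0 ≤ r ∧ r * r + r ≤ y ∧ y < (r + 1) * (r + 1) + (r + 1)

theorem goodSI_unique {y r r' : Int} (h : GoodSI y r) (h' : GoodSI y r') : r = r' := by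
  obtain ⟨hr0, hr1, hr2⟩ := h
  obtain ⟨hs0, hs1, hs2⟩ := h'
  rcases lt_trichotomy r r' with hlt | heq | hgt
  · nlinarith
  · exact heq
  · nlinarith

theorem siMid_bounds {left right : Int} (h : left ≤ right) :
    left ≤ siMid left right ∧ siMid left right ≤ right := by
  rw [siMid, add_comm]; exact PySem.Int.floordiv_two_mid_bounds h

-- on negative y the loop only ever shrinks right and returns its result unchanged
theorem siLoopA_neg (y : Int) (hy : y < 0) :
    ∀ (fuel : Nat) (left right result : Int), 0 ≤ left →
      (right - left + 1).toNat < fuel → siLoopA fuel y left right result = result := by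
  intro fuel
  induction fuel with
  | zero => intro left right result _ hf; omega
  | succ fuel ih =>
      intro left right result hl hf
      rw [siLoopA]
      by_cases h : left ≤ right
      · have hm := siMid_bounds h
        have h0 : 0 ≤ siEqn (siMid left right) := by rw [siEqn]; nlinarith [hm.1]
        rw [if_pos h, if_neg (by omega), if_neg (by omega)]
        exact ih left (siMid left right - 1) result hl (by omega)
      · rw [if_neg h]

-- loop invariant: result is a valid lower candidate, everything above right fails,
-- everything below left is ≤ result
theorem siLoopA_good (y : Int) (hy : 0 ≤ y) :
    ∀ (fuel : Nat) (left right result : Int), 0 ≤ left → 0 ≤ result →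
      result * result + result ≤ y →
      (∀ m, 0 ≤ m → right < m → y < m * m + m) →
      (∀ m, m < left → m * m + m ≤ y → m ≤ result) →
      (right - left + 1).toNat < fuel →
      GoodSI y (siLoopA fuel y left right result) := by
  intro fuel
  induction fuel with
  | zero => intro left right result _ _ _ _ _ hf; omega
  | succ fuel ih =>
      intro left right result hl hr0 hres hup hlo hf
      rw [siLoopA]
      by_cases h : left ≤ right
      · have hm := siMid_bounds h
        rw [if_pos h]
        by_cases heq : siEqn (siMid left right) = y
        · rw [if_pos heq]
          rw [siEqn] at heq
          exact ⟨by omega, by rw [heq], by nlinarith⟩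
        · rw [if_neg heq]
          by_cases hlt : siEqn (siMid left right) < y
          · rw [if_pos hlt, siEqn] at *
            exact ih (siMid left right + 1) right (siMid left right) (by omega) (by omega)
              (le_of_lt hlt) hup (fun m hm' _ => by omega) (by omega)
          · rw [if_neg hlt]
            rw [siEqn] at heq hlt
            refine ih left (siMid left right - 1) result hl hr0 hres
              (fun m hm0 hmr => ?_) hlo (by omega)
            have hmid : siMid left right ≤ m := by omega
            have hylt : y < siMid left right * siMid left right + siMid left right :=
              lt_of_le_of_ne (not_lt.mp hlt) (Ne.symm heq)
            nlinarith [mul_le_mul hmid hmid (by omega : (0:ℤ) ≤ siMid left right) hm0]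
      · rw [if_neg h]
        refine ⟨hr0, hres, ?_⟩
        by_contra hc
        push_neg at hc
        have h1 : result + 1 ≤ result := by
          by_cases hr : right < result + 1
          · exact absurd (hup (result + 1) (by omega) hr) (by omega)
          · exact hlo (result + 1) (by omega) hc
        omega

-- one Newton step from any positive guess stays at or above every lower witness s
theorem newton_ge (n g s : Int) (hg : 0 < g) (hs : 0 ≤ s) (hsn : s * s ≤ n) :
    s ≤ siNext n g := by
  have hq : PySem.Int.floordiv n g * g ≤ n ∧ n < (PySem.Int.floordiv n g + 1) * g :=
    (PySem.Int.floordiv_eq_iff_of_pos hg).mp rfl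
  rw [siNext, PySem.Int.le_floordiv_iff_mul_le (by omega)]
  by_contra hc
  push_neg at hc
  have hqle : PySem.Int.floordiv n g ≤ 2 * s - 1 - g := by omega
  nlinarith [sq_nonneg (g - s), hq.1, hq.2,
    mul_le_mul_of_nonneg_right hqle (le_of_lt hg)]

theorem siIter_good (n : Int) (hn : 2 ≤ n) :
    ∀ (fuel : Nat) (g : Int), 0 < g → n < (g + 1) * (g + 1) → g.toNat < fuel →
      0 ≤ siIter fuel n g ∧ siIter fuel n g * siIter fuel n g ≤ n ∧
        n < (siIter fuel n g + 1) * (siIter fuel n g + 1) := by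
  intro fuel
  induction fuel with
  | zero => intro g hg _ hf; omega
  | succ fuel ih =>
      intro g hg hub hf
      rw [siIter]
      by_cases h : siNext n g < g
      · rw [if_pos h]
        have hpos : 0 < siNext n g := by
          have := newton_ge n g 1 hg (by omega) (by nlinarith)
          omega
        refine ih (siNext n g) hpos ?_ (by omega)
        by_contra hc
        push_neg at hc
        have := newton_ge n g (siNext n g + 1) hg (by omega) hc
        omega
      · rw [if_neg h]
        have hge : g ≤ siNext n g := not_lt.mp h
        have hq : PySem.Int.floordiv n g * g ≤ n ∧ n < (PySem.Int.floordiv n g + 1) * g :=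
          (PySem.Int.floordiv_eq_iff_of_pos hg).mp rfl
        rw [siNext] at hge
        have h2 : g * 2 ≤ g + PySem.Int.floordiv n g :=
          (PySem.Int.le_floordiv_iff_mul_le (by omega)).mp hge
        have hgq : g ≤ PySem.Int.floordiv n g := by omega
        exact ⟨by omega, by nlinarith [hq.1], hub⟩

theorem siIsqrt_good (n : Int) (hn : 1 ≤ n) :
    0 ≤ siIsqrt n ∧ siIsqrt n * siIsqrt n ≤ n ∧ n < (siIsqrt n + 1) * (siIsqrt n + 1) := by
  rw [siIsqrt]
  split
  · have h1 : n = 1 := by omega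
    subst h1; norm_num
  · rename_i hgt
    have hn2 : 2 ≤ n := by omega
    have hbits : n.natAbs < 2 ^ PySem.Int.bitLength n := PySem.Int.lt_two_pow_bitLength n
    have hbl1 : 1 ≤ PySem.Int.bitLength n := by
      by_contra hc
      have h0 : PySem.Int.bitLength n = 0 := by omega
      rw [h0] at hbits
      omega
    set bl := PySem.Int.bitLength n with hbl
    set k := (bl - 1) / 2 + 1 with hk
    have hk2 : bl ≤ 2 * k := by omega
    have hsh : (1 : Int) <<< k = 2 ^ k := by simp [Int.shiftLeft_eq]
    have hgpos : (0 : Int) < 2 ^ k := by positivity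
    have hcast : (n.natAbs : Int) = n := Int.natAbs_of_nonneg (by omega)
    have hnlt : n < (2 : Int) ^ bl := by
      calc n = (n.natAbs : Int) := hcast.symm
        _ < ((2 ^ bl : Nat) : Int) := by exact_mod_cast hbits
        _ = (2 : Int) ^ bl := by push_cast; ring
    have hpow : (2 : Int) ^ bl ≤ (2 : Int) ^ (2 * k) :=
      pow_le_pow_right₀ (by norm_num) hk2
    have hub : n < ((1 : Int) <<< k + 1) * ((1 : Int) <<< k + 1) := by
      rw [hsh]
      have h2k : (2 : Int) ^ (2 * k) = 2 ^ k * 2 ^ k := by rw [two_mul, pow_add]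
      nlinarith
    exact siIter_good n hn2 _ _ (by rw [hsh]; exact hgpos) hub (by omega)

theorem alt_good (y : Int) (hy : 0 ≤ y) : GoodSI y (solving_inequality_alt y) := by
  rw [solving_inequality_alt, if_neg (by omega)]
  obtain ⟨hs0, hs1, hs2⟩ := siIsqrt_good (1 + 4 * y) (by omega)
  set s := siIsqrt (1 + 4 * y)
  have hs1' : 1 ≤ s := by
    by_contra hc
    have h0 : s = 0 := by omega
    rw [h0] at hs2
    norm_num at hs2
    omega
  set r := PySem.Int.floordiv (s - 1) 2 with hr
  have hbr : r * 2 ≤ s - 1 ∧ s - 1 < (r + 1) * 2 :=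
    (PySem.Int.floordiv_eq_iff_of_pos (by norm_num)).mp rfl
  have hcases : s = 2 * r + 1 ∨ s = 2 * r + 2 := by omega
  have hr0 : 0 ≤ r := by omega
  rcases hcases with h | h <;> rw [h] at hs1 hs2 <;>
    exact ⟨hr0, by nlinarith, by nlinarith⟩

-- ===== VERDICT (by name: the statement is the Claim_ definition above) =====
theorem solving_inequality_spec : Claim_equal_solving_inequality := by
  intro y hd
  unfold Spec_solving_inequality
  have hdom : -2147483648 ≤ y ∧ y ≤ 2147483648 := by
    simpa [Dom_solving_inequality, pvDomInt] using hd
  by_cases hy : y < 0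
  · rw [solving_inequality,
      siLoopA_neg y hy 100000000000000002 0 100000000000000000 0 (by omega) (by norm_num),
      solving_inequality_alt, if_pos hy]
  · push_neg at hy
    have ha : GoodSI y (solving_inequality y) := by
      rw [solving_inequality]
      refine siLoopA_good y hy 100000000000000002 0 100000000000000000 0 (by omega) (by omega)
        (by omega) (fun m hm0 hmr => ?_) (fun m hm _ => by omega) (by norm_num)
      nlinarith [mul_self_nonneg m]
    exact goodSI_unique ha (alt_good y hy)
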